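-- pv_equiv track=rewrite | github.com/Mowareking/GOPS-Discord-Bot | main.py | create_cards
-- ===== SOURCE A (Python) =====
-- def create_cards(cards, suit):
--     message = ""
--
--     if suit in ["diamonds", "hearts"]:
--         suit_colour = "r"
--     else:
--         suit_colour = "b"
--
--     if len(cards) > 10:
--         first_pass = cards[:10]
--         len_first_pass = 10
--     else:
--         first_pass = cards
--         len_first_pass = len(cards)
--
--     for card in first_pass:
--         if suit_colour == "r":
--             if card == "A":
--                 message += "<:rA:1169599443759272047>"
--             elif card == "2":
--                 message += "<:r2:1169599490429304852>"
--             elif card == "3":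
--                 message += "<:r3:1169599492673241150>"
--             elif card == "4":
--                 message += "<:r4:1169599494963331072>"
--             elif card == "5":
--                 message += "<:r5:1169599514785620068>"
--             elif card == "6":
--                 message += "<:r6:1169599517994262559>"
--             elif card == "7":
--                 message += "<:r7:1169599600643018842>"
--             elif card == "8":
--                 message += "<:r8:1169599602899558440>"
--             elif card == "9":
--                 message += "<:r9:1169599440072486942>"
--             elif card == "10":
--                 message += "<:r10:1169599442391937064>"
--             elif card == "J":
--                 message += "<:rJ:1169599461379551263>"
--             elif card == "Q":
--                 message += "<:rQ:1169599598298398760>"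
--             elif card == "K":
--                 message += "<:rK:1169599605466472580>"
--
--         if suit_colour == "b":
--             if card == "A":
--                 message += "<:bA:1169599215425556590>"
--             elif card == "2":
--                 message += "<:b2:1169599236237692948>"
--             elif card == "3":
--                 message += "<:b3:1169599242910847046>"
--             elif card == "4":
--                 message += "<:b4:1169599247289683979>"
--             elif card == "5":
--                 message += "<:b5:1169599254860402728>"
--             elif card == "6":
--                 message += "<:b6:1169599265614602271>"
--             elif card == "7":
--                 message += "<:b7:1169599283138408548>"
--             elif card == "8":
--                 message += "<:b8:1169599209037639831>"
--             elif card == "9":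
--                 message += "<:b9:1169599212011405312>"
--             elif card == "10":
--                 message += "<:b10:1169599213412302878>"
--             elif card == "J":
--                 message += "<:bJ:1169599217686286376>"
--             elif card == "Q":
--                 message += "<:bQ:1169599230487302144>"
--             elif card == "K":
--                 message += "<:bK:1169599226372685925>"
--
--
--     if cards:
--         message += "\n"
--
--     if suit == "diamonds":
--         message += "<:ediamond:1169599445285998673>"*len_first_pass
--     elif suit == "hearts":
--         message += "<:ehearts:1169599296602120193>"*len_first_pass
--     elif suit == "clubs":
--         message += "<:eclubs:1169599234190880818>"*len_first_pass
--     elif suit == "spades":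
--         message += "<:espades:1169599488487325738>"*len_first_pass
--
--     if len_first_pass != 10:
--         return message
--
--     message += "\n"
--     second_pass = create_cards(cards[10:], suit)
--     message += second_pass
--     return message
-- ===== SOURCE B (Python) =====
-- RED = {
--     "A": "<:rA:1169599443759272047>",
--     "2": "<:r2:1169599490429304852>",
--     "3": "<:r3:1169599492673241150>",
--     "4": "<:r4:1169599494963331072>",
--     "5": "<:r5:1169599514785620068>",
--     "6": "<:r6:1169599517994262559>",
--     "7": "<:r7:1169599600643018842>",
--     "8": "<:r8:1169599602899558440>",
--     "9": "<:r9:1169599440072486942>",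
--     "10": "<:r10:1169599442391937064>",
--     "J": "<:rJ:1169599461379551263>",
--     "Q": "<:rQ:1169599598298398760>",
--     "K": "<:rK:1169599605466472580>",
-- }
--
-- BLACK = {
--     "A": "<:bA:1169599215425556590>",
--     "2": "<:b2:1169599236237692948>",
--     "3": "<:b3:1169599242910847046>",
--     "4": "<:b4:1169599247289683979>",
--     "5": "<:b5:1169599254860402728>",
--     "6": "<:b6:1169599265614602271>",
--     "7": "<:b7:1169599283138408548>",
--     "8": "<:b8:1169599209037639831>",
--     "9": "<:b9:1169599212011405312>",
--     "10": "<:b10:1169599213412302878>",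
--     "J": "<:bJ:1169599217686286376>",
--     "Q": "<:bQ:1169599230487302144>",
--     "K": "<:bK:1169599226372685925>",
-- }
--
-- EMPTY = {
--     "diamonds": "<:ediamond:1169599445285998673>",
--     "hearts": "<:ehearts:1169599296602120193>",
--     "clubs": "<:eclubs:1169599234190880818>",
--     "spades": "<:espades:1169599488487325738>",
-- }
--
--
-- def create_cards(cards, suit):
--     emoji = RED if suit in ("diamonds", "hearts") else BLACK
--     empty = EMPTY.get(suit, "")
--     parts = []
--     rest = cards
--     while rest:
--         chunk, rest = rest[:10], rest[10:]
--         parts.append("".join(emoji.get(c, "") for c in chunk) + "\n" + empty * len(chunk))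
--     out = "\n".join(parts)
--     if cards and len(cards) % 10 == 0:
--         out += "\n"
--     return out
-- ===== Notes on version B (the rewrite author's own statement) =====
-- stated objective: alternative
-- what changed: Replaces the per-chunk tail recursion (which re-concatenates the whole remaining output at every level) and the two 13-way if-elif emoji chains by an iterative while-loop over 10-card slices with dict lookups and a single ' '.join, adding the trailing ' ' exactly when the card count is a positive multiple of 10.
import Mathlib
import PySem

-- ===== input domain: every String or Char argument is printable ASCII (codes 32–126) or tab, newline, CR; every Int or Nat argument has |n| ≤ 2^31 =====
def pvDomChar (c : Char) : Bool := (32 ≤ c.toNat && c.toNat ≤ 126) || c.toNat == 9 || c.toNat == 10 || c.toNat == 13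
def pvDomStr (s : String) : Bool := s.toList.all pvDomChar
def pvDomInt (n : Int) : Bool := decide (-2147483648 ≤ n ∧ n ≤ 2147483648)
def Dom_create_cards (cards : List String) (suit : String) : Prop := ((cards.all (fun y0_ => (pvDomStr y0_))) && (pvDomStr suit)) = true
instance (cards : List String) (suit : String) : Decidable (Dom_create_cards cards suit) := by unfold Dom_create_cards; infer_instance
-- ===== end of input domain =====

-- B replaces A's per-chunk tail recursion (which re-concatenates the whole remaining output at
-- every level) and its two 13-way if-elif chains by one while-loop over 10-card slices with dict
-- lookups and a single '\n'.join at the end; objective: alternative decomposition.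

-- Python's  s * n  for a string s and a count n ≥ 0 (exact: repeated concatenation).
def pyStrMul (s : String) : Nat → String
  | 0 => ""
  | n + 1 => s ++ pyStrMul s n

-- ===== PORT A =====
-- the red 13-way if-elif chain of A (falls through to "" when no branch fires)
def redEmoji (card : String) : String :=
  if card = "A" then "<:rA:1169599443759272047>"
  else if card = "2" then "<:r2:1169599490429304852>"
  else if card = "3" then "<:r3:1169599492673241150>"
  else if card = "4" then "<:r4:1169599494963331072>"
  else if card = "5" then "<:r5:1169599514785620068>"
  else if card = "6" then "<:r6:1169599517994262559>"
  else if card = "7" then "<:r7:1169599600643018842>"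
  else if card = "8" then "<:r8:1169599602899558440>"
  else if card = "9" then "<:r9:1169599440072486942>"
  else if card = "10" then "<:r10:1169599442391937064>"
  else if card = "J" then "<:rJ:1169599461379551263>"
  else if card = "Q" then "<:rQ:1169599598298398760>"
  else if card = "K" then "<:rK:1169599605466472580>"
  else ""

-- the black 13-way if-elif chain of A
def blackEmoji (card : String) : String :=
  if card = "A" then "<:bA:1169599215425556590>"
  else if card = "2" then "<:b2:1169599236237692948>"
  else if card = "3" then "<:b3:1169599242910847046>"
  else if card = "4" then "<:b4:1169599247289683979>"
  else if card = "5" then "<:b5:1169599254860402728>"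
  else if card = "6" then "<:b6:1169599265614602271>"
  else if card = "7" then "<:b7:1169599283138408548>"
  else if card = "8" then "<:b8:1169599209037639831>"
  else if card = "9" then "<:b9:1169599212011405312>"
  else if card = "10" then "<:b10:1169599213412302878>"
  else if card = "J" then "<:bJ:1169599217686286376>"
  else if card = "Q" then "<:bQ:1169599230487302144>"
  else if card = "K" then "<:bK:1169599226372685925>"
  else ""

-- cards[:10] / cards[10:] with nonnegative literal bounds are take/drop
-- (PySem.List.slice_to_natCast / slice_from_natCast).
def create_cards (cards : List String) (suit : String) : String :=
  let suit_colour : String := if suit = "diamonds" ∨ suit = "hearts" then "r" else "b"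
  let first_pass := if cards.length > 10 then cards.take 10 else cards
  let len_first_pass := if cards.length > 10 then 10 else cards.length
  let message := first_pass.foldl (fun m card =>
      let m := if suit_colour = "r" then m ++ redEmoji card else m
      if suit_colour = "b" then m ++ blackEmoji card else m) ""
  let message := if cards.isEmpty then message else message ++ "\n"
  let message :=
    if suit = "diamonds" then message ++ pyStrMul "<:ediamond:1169599445285998673>" len_first_pass
    else if suit = "hearts" then message ++ pyStrMul "<:ehearts:1169599296602120193>" len_first_pass
    else if suit = "clubs" then message ++ pyStrMul "<:eclubs:1169599234190880818>" len_first_pass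
    else if suit = "spades" then message ++ pyStrMul "<:espades:1169599488487325738>" len_first_pass
    else message
  if len_first_pass ≠ 10 then message
  else message ++ "\n" ++ create_cards (cards.drop 10) suit
termination_by cards.length
decreasing_by
  rename_i h
  simp only [List.length_drop]
  simp only [len_first_pass] at h
  split at h <;> omega

-- ===== PORT B =====
def RED : PySem.Dict String String := PySem.Dict.mk
  [("A", "<:rA:1169599443759272047>"), ("2", "<:r2:1169599490429304852>"),
   ("3", "<:r3:1169599492673241150>"), ("4", "<:r4:1169599494963331072>"),
   ("5", "<:r5:1169599514785620068>"), ("6", "<:r6:1169599517994262559>"),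
   ("7", "<:r7:1169599600643018842>"), ("8", "<:r8:1169599602899558440>"),
   ("9", "<:r9:1169599440072486942>"), ("10", "<:r10:1169599442391937064>"),
   ("J", "<:rJ:1169599461379551263>"), ("Q", "<:rQ:1169599598298398760>"),
   ("K", "<:rK:1169599605466472580>")]

def BLACK : PySem.Dict String String := PySem.Dict.mk
  [("A", "<:bA:1169599215425556590>"), ("2", "<:b2:1169599236237692948>"),
   ("3", "<:b3:1169599242910847046>"), ("4", "<:b4:1169599247289683979>"),
   ("5", "<:b5:1169599254860402728>"), ("6", "<:b6:1169599265614602271>"),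
   ("7", "<:b7:1169599283138408548>"), ("8", "<:b8:1169599209037639831>"),
   ("9", "<:b9:1169599212011405312>"), ("10", "<:b10:1169599213412302878>"),
   ("J", "<:bJ:1169599217686286376>"), ("Q", "<:bQ:1169599230487302144>"),
   ("K", "<:bK:1169599226372685925>")]

def EMPTYD : PySem.Dict String String := PySem.Dict.mk
  [("diamonds", "<:ediamond:1169599445285998673>"), ("hearts", "<:ehearts:1169599296602120193>"),
   ("clubs", "<:eclubs:1169599234190880818>"), ("spades", "<:espades:1169599488487325738>")]

-- the while-loop of B: consume the list in slices of 10, one part per slice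
def chunkParts (emoji : PySem.Dict String String) (empty : String) (rest : List String) : List String :=
  if rest.isEmpty then []
  else
    let chunk := rest.take 10
    (PySem.Str.join "" (chunk.map (fun c => emoji.getD c "")) ++ "\n" ++ pyStrMul empty chunk.length)
      :: chunkParts emoji empty (rest.drop 10)
termination_by rest.length
decreasing_by
  rename_i h
  simp only [List.length_drop]
  simp only [List.isEmpty_iff] at h
  have : rest.length ≠ 0 := fun hn => h (List.eq_nil_of_length_eq_zero hn)
  omega

def create_cards_alt (cards : List String) (suit : String) : String :=
  let emoji := if suit = "diamonds" ∨ suit = "hearts" then RED else BLACK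
  let empty := EMPTYD.getD suit ""
  let out := PySem.Str.join "\n" (chunkParts emoji empty cards)
  if ¬ cards.isEmpty ∧ cards.length % 10 = 0 then out ++ "\n" else out

-- ===== PRECONDITION & SPEC =====
def Spec_create_cards (cards : List String) (suit : String) (out : String) : Prop := out = create_cards_alt cards suit
instance (cards : List String) (suit : String) (out : String) : Decidable (Spec_create_cards cards suit out) := by unfold Spec_create_cards; infer_instance

-- ===== CLAIM (what is proved, stated in full; the proofs are below) =====
def Claim_equal_create_cards : Prop := ∀ (cards : List String) (suit : String), Dom_create_cards cards suit → Spec_create_cards cards suit (create_cards cards suit)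

-- ===== LEMMAS AND PROOFS =====

theorem join_nil' (s : String) : PySem.Str.join s [] = "" := by
  simp [PySem.Str.join, PySem.Chars.join, List.intercalate]

theorem join_singleton' (s x : String) : PySem.Str.join s [x] = x := by
  simp [PySem.Str.join, PySem.Chars.join_singleton]

theorem join_cons_cons' (s x y : String) (l : List String) :
    PySem.Str.join s (x :: y :: l) = x ++ s ++ PySem.Str.join s (y :: l) := by
  apply String.toList_inj.mp
  simp [PySem.Str.join, PySem.Chars.join_cons_cons, String.toList_append]

theorem join_empty_cons (x : String) (l : List String) :
    PySem.Str.join "" (x :: l) = x ++ PySem.Str.join "" l := by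
  cases l with
  | nil => rw [join_singleton', join_nil', String.append_empty]
  | cons y t => rw [join_cons_cons', String.append_empty]

theorem red_getD (c : String) : RED.getD c "" = redEmoji c := by
  by_cases h0 : c = "A"
  · subst h0; decide
  by_cases h1 : c = "2"
  · subst h1; decide
  by_cases h2 : c = "3"
  · subst h2; decide
  by_cases h3 : c = "4"
  · subst h3; decide
  by_cases h4 : c = "5"
  · subst h4; decide
  by_cases h5 : c = "6"
  · subst h5; decide
  by_cases h6 : c = "7"
  · subst h6; decide
  by_cases h7 : c = "8"
  · subst h7; decide
  by_cases h8 : c = "9"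
  · subst h8; decide
  by_cases h9 : c = "10"
  · subst h9; decide
  by_cases h10 : c = "J"
  · subst h10; decide
  by_cases h11 : c = "Q"
  · subst h11; decide
  by_cases h12 : c = "K"
  · subst h12; decide
  simp only [RED, redEmoji, PySem.Dict.getD_eq_get?_getD, PySem.Dict.get?_mk_cons, beq_iff_eq, eq_false h0, eq_false h1, eq_false h2, eq_false h3, eq_false h4, eq_false h5, eq_false h6, eq_false h7, eq_false h8, eq_false h9, eq_false h10, eq_false h11, eq_false h12, eq_false (show ¬(("A":String) = c) from fun hh => h0 hh.symm), eq_false (show ¬(("2":String) = c) from fun hh => h1 hh.symm), eq_false (show ¬(("3":String) = c) from fun hh => h2 hh.symm), eq_false (show ¬(("4":String) = c) from fun hh => h3 hh.symm), eq_false (show ¬(("5":String) = c) from fun hh => h4 hh.symm), eq_false (show ¬(("6":String) = c) from fun hh => h5 hh.symm), eq_false (show ¬(("7":String) = c) from fun hh => h6 hh.symm), eq_false (show ¬(("8":String) = c) from fun hh => h7 hh.symm), eq_false (show ¬(("9":String) = c) from fun hh => h8 hh.symm), eq_false (show ¬(("10":String) = c) from fun hh => h9 hh.symm), eq_false (show ¬(("J":String)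 = c) from fun hh => h10 hh.symm), eq_false (show ¬(("Q":String) = c) from fun hh => h11 hh.symm), eq_false (show ¬(("K":String) = c) from fun hh => h12 hh.symm), if_false]
  rfl

theorem black_getD (c : String) : BLACK.getD c "" = blackEmoji c := by
  by_cases h0 : c = "A"
  · subst h0; decide
  by_cases h1 : c = "2"
  · subst h1; decide
  by_cases h2 : c = "3"
  · subst h2; decide
  by_cases h3 : c = "4"
  · subst h3; decide
  by_cases h4 : c = "5"
  · subst h4; decide
  by_cases h5 : c = "6"
  · subst h5; decide
  by_cases h6 : c = "7"
  · subst h6; decide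
  by_cases h7 : c = "8"
  · subst h7; decide
  by_cases h8 : c = "9"
  · subst h8; decide
  by_cases h9 : c = "10"
  · subst h9; decide
  by_cases h10 : c = "J"
  · subst h10; decide
  by_cases h11 : c = "Q"
  · subst h11; decide
  by_cases h12 : c = "K"
  · subst h12; decide
  simp only [BLACK, blackEmoji, PySem.Dict.getD_eq_get?_getD, PySem.Dict.get?_mk_cons, beq_iff_eq, eq_false h0, eq_false h1, eq_false h2, eq_false h3, eq_false h4, eq_false h5, eq_false h6, eq_false h7, eq_false h8, eq_false h9, eq_false h10, eq_false h11, eq_false h12, eq_false (show ¬(("A":String) = c) from fun hh => h0 hh.symm), eq_false (show ¬(("2":String) = c) from fun hh => h1 hh.symm), eq_false (show ¬(("3":String) = c) from fun hh => h2 hh.symm), eq_false (show ¬(("4":String) = c) from fun hh => h3 hh.symm), eq_false (show ¬(("5":String) = c) from fun hh => h4 hh.symm), eq_false (show ¬(("6":String) = c) from fun hh => h5 hh.symm), eq_false (show ¬(("7":String) = c) from fun hh => h6 hh.symm), eq_false (show ¬(("8":String) = c) from fun hh => h7 hh.symm), eq_false (show ¬(("9":String) = c) from fun hh => h8 hh.symm),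 eq_false (show ¬(("10":String) = c) from fun hh => h9 hh.symm), eq_false (show ¬(("J":String) = c) from fun hh => h10 hh.symm), eq_false (show ¬(("Q":String) = c) from fun hh => h11 hh.symm), eq_false (show ¬(("K":String) = c) from fun hh => h12 hh.symm), if_false]
  rfl


theorem pyStrMul_empty (n : Nat) : pyStrMul "" n = "" := by
  induction n with
  | zero => rfl
  | succ n ih => simp [pyStrMul, ih]

theorem foldl_append_join (f : String → String) (l : List String) (m : String) :
    l.foldl (fun m c => m ++ f c) m = m ++ PySem.Str.join "" (l.map f) := by
  induction l generalizing m with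
  | nil => simp [join_nil']
  | cons x t ih =>
      simp only [List.foldl_cons, List.map_cons]
      rw [ih, join_empty_cons, String.append_assoc]

-- A's suit-emoji tail equals appending (EMPTYD lookup) * n
theorem suit_tail (suit msg : String) (n : Nat) :
    (if suit = "diamonds" then msg ++ pyStrMul "<:ediamond:1169599445285998673>" n
     else if suit = "hearts" then msg ++ pyStrMul "<:ehearts:1169599296602120193>" n
     else if suit = "clubs" then msg ++ pyStrMul "<:eclubs:1169599234190880818>" n
     else if suit = "spades" then msg ++ pyStrMul "<:espades:1169599488487325738>" n
     else msg) = msg ++ pyStrMul (EMPTYD.getD suit "") n := by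
  by_cases h0 : suit = "diamonds"
  · subst h0; rfl
  by_cases h1 : suit = "hearts"
  · subst h1; simp only [eq_false h0, if_false]; rfl
  by_cases h2 : suit = "clubs"
  · subst h2; simp only [eq_false h0, eq_false h1, if_false]; rfl
  by_cases h3 : suit = "spades"
  · subst h3; simp only [eq_false h0, eq_false h1, eq_false h2, if_false]; rfl
  simp only [eq_false h0, eq_false h1, eq_false h2, eq_false h3, if_false, EMPTYD,
    PySem.Dict.getD_eq_get?_getD, PySem.Dict.get?_mk_cons, beq_iff_eq,
    eq_false (show ¬(("diamonds":String) = suit) from fun hh => h0 hh.symm),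
    eq_false (show ¬(("hearts":String) = suit) from fun hh => h1 hh.symm),
    eq_false (show ¬(("clubs":String) = suit) from fun hh => h2 hh.symm),
    eq_false (show ¬(("spades":String) = suit) from fun hh => h3 hh.symm)]
  rw [show ({ items := [] } : PySem.Dict String String).get? suit = none from rfl,
    show (none : Option String).getD "" = "" from rfl, pyStrMul_empty, String.append_empty]

-- A's loop body over a chunk equals m ++ B's chunk row, for the dict B selects from the suit
theorem row_eq (suit : String) (l : List String) (m : String) :
    l.foldl (fun m card =>
      let m2 := if (if suit = "diamonds" ∨ suit = "hearts" then "r" else "b") = "r" then m ++ redEmoji card else m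
      if (if suit = "diamonds" ∨ suit = "hearts" then "r" else "b") = "b" then m2 ++ blackEmoji card else m2) m
    = m ++ PySem.Str.join "" (l.map (fun c =>
        (if suit = "diamonds" ∨ suit = "hearts" then RED else BLACK).getD c "")) := by
  by_cases h : suit = "diamonds" ∨ suit = "hearts" <;>
    simp only [h, if_true, if_false,
      show (("r":String) = "b") = False by simp,
      show (("b":String) = "r") = False by simp] <;>
    · rw [foldl_append_join]
      simp [red_getD, black_getD]

-- proof-local abbreviations: the dict B selects for a suit, and one chunk segment
def dictOf (suit : String) : PySem.Dict String String :=
  if suit = "diamonds" ∨ suit = "hearts" then RED else BLACK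

def partOf (suit : String) (rest : List String) : String :=
  PySem.Str.join "" ((rest.take 10).map (fun c => (dictOf suit).getD c "")) ++ "\n"
    ++ pyStrMul (EMPTYD.getD suit "") (rest.take 10).length

theorem chunkParts_nil (e : PySem.Dict String String) (em : String) :
    chunkParts e em [] = [] := by
  rw [chunkParts]; rfl

theorem chunkParts_cons (e : PySem.Dict String String) (em : String) (rest : List String)
    (h : rest ≠ []) :
    chunkParts e em rest =
      (PySem.Str.join "" ((rest.take 10).map (fun c => e.getD c "")) ++ "\n"
        ++ pyStrMul em (rest.take 10).length) :: chunkParts e em (rest.drop 10) := by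
  rw [chunkParts]
  simp [h]

theorem A_nil (suit : String) : create_cards [] suit = "" := by
  rw [create_cards]
  norm_num
  split_ifs <;> rfl

theorem alt_nil (suit : String) : create_cards_alt [] suit = "" := by
  simp [create_cards_alt, chunkParts_nil, join_nil']

theorem A_step (cards : List String) (suit : String) (h : cards ≠ []) :
    create_cards cards suit = partOf suit cards ++
      (if cards.length < 10 then "" else "\n" ++ create_cards (cards.drop 10) suit) := by
  rw [create_cards]
  simp only [List.isEmpty_eq_false_iff.mpr h, Bool.false_eq_true, if_false, row_eq,
    String.empty_append, suit_tail, partOf, dictOf]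
  by_cases h10 : cards.length > 10
  · simp only [if_pos h10]
    rw [if_neg (show ¬(10 ≠ 10) from by omega), if_neg (show ¬(cards.length < 10) from by omega)]
    rw [show (cards.take 10).length = 10 from by simp [List.length_take]; omega]
    simp [String.append_assoc]
  · simp only [if_neg h10]
    rw [List.take_of_length_le (by omega : cards.length ≤ 10)]
    by_cases heq : cards.length = 10
    · rw [if_neg (show ¬(cards.length ≠ 10) from by omega),
        if_neg (show ¬(cards.length < 10) from by omega)]
      simp [String.append_assoc]
    · rw [if_pos (show cards.length ≠ 10 from heq), if_pos (show cards.length < 10 from by omega)]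
      simp [String.append_assoc]

theorem alt_small (cards : List String) (suit : String) (h : cards ≠ [])
    (hle : cards.length ≤ 10) :
    create_cards_alt cards suit = partOf suit cards ++
      (if cards.length < 10 then "" else "\n") := by
  have hdrop : cards.drop 10 = [] := List.drop_eq_nil_of_le hle
  simp only [create_cards_alt, chunkParts_cons _ _ _ h, hdrop, chunkParts_nil,
    join_singleton', partOf, dictOf]
  have hpos : 0 < cards.length := List.length_pos_of_ne_nil h
  by_cases heq : cards.length = 10
  · rw [if_pos ⟨by simp [List.isEmpty_eq_false_iff.mpr h], by omega⟩,
      if_neg (show ¬(cards.length < 10) from by omega)]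
  · rw [if_neg (show ¬(¬cards.isEmpty = true ∧ cards.length % 10 = 0) from by
      rintro ⟨-, hm⟩; omega), if_pos (show cards.length < 10 from by omega)]
    rw [String.append_empty]

theorem alt_step (cards : List String) (suit : String) (h10 : 10 < cards.length) :
    create_cards_alt cards suit =
      partOf suit cards ++ ("\n" ++ create_cards_alt (cards.drop 10) suit) := by
  have hne : cards ≠ [] := by intro hc; subst hc; simp at h10
  have hdne : cards.drop 10 ≠ [] := by
    intro hc
    have := congrArg List.length hc
    simp at this
    omega
  obtain ⟨q, rest', hq⟩ : ∃ q rest',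
      chunkParts (dictOf suit) (EMPTYD.getD suit "") (cards.drop 10) = q :: rest' := by
    rw [chunkParts_cons _ _ _ hdne]; exact ⟨_, _, rfl⟩
  conv_lhs => rw [create_cards_alt]
  conv_rhs => rw [create_cards_alt]
  simp only [partOf]
  rw [show (if suit = "diamonds" ∨ suit = "hearts" then RED else BLACK) = dictOf suit from rfl]
  rw [chunkParts_cons _ _ _ hne, hq, join_cons_cons']
  split_ifs with h1 h2
  · simp [String.append_assoc]
  · exfalso
    apply h2
    refine ⟨by simp [List.isEmpty_iff, hdne], ?_⟩
    have hm := h1.2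
    simp only [List.length_drop]
    omega
  · rename_i h2
    exfalso
    apply h1
    refine ⟨by simp [List.isEmpty_iff, hne], ?_⟩
    have hm := h2.2
    simp only [List.length_drop] at hm
    omega
  · simp [String.append_assoc]

theorem key (n : Nat) : ∀ (cards : List String) (suit : String), cards.length ≤ n →
    create_cards cards suit = create_cards_alt cards suit := by
  induction n with
  | zero =>
      intro cards suit hlen
      have : cards = [] := List.eq_nil_of_length_eq_zero (by omega)
      subst this
      rw [A_nil, alt_nil]
  | succ n ih =>
      intro cards suit hlen
      by_cases hnil : cards = []
      · subst hnil; rw [A_nil, alt_nil]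
      · rw [A_step _ _ hnil]
        by_cases hlt : cards.length < 10
        · rw [alt_small _ _ hnil (by omega), if_pos hlt, if_pos hlt]
        · by_cases heq : cards.length = 10
          · rw [alt_small _ _ hnil (by omega), if_neg hlt, if_neg hlt]
            rw [show cards.drop 10 = [] from List.drop_eq_nil_of_le (by omega), A_nil,
              String.append_empty]
          · have h10 : 10 < cards.length := by omega
            rw [alt_step _ _ h10, if_neg hlt]
            rw [ih (cards.drop 10) suit (by simp only [List.length_drop]; omega)]

-- ===== VERDICT (by name: the statement is the Claim_ definition above) =====
theorem create_cards_spec : Claim_equal_create_cards := by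
  unfold Claim_equal_create_cards Spec_create_cards
  intro cards suit _
  exact key cards.length cards suit le_rfl
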